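-- pv_equiv track=rewrite | github.com/Jsundstrom0223/should_it_be_hyphenated | entry_parser.py | check_alt_forms
-- ===== SOURCE A (Python) =====
-- def check_alt_forms(search_term_chars, field_value):
--     """Check whether an entry's va, inf, or stems field contains a form of the search term.
--
--     Arguments:
--     search_term: The search term used in the API call (an element of the compound).
--     field_value: The va, inf, or stems field of an entry.
--
--     Returns:
--     match: A boolean value. True means that the search term is a variant, inflection, or
--     stem of an open or hyphenated compound.
--     """
--     match = False
--     splitters = [" ", "-"]
--     for splitter in splitters:
--         if not match:
--             for i, _ in enumerate(search_term_chars):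
--                 first_ele = "".join(search_term_chars[: i+1])
--                 second_ele = "".join(search_term_chars[i + 1:])
--                 both = first_ele + splitter + second_ele
--                 if both == field_value:
--                     match = True
--
--     return match
-- ===== SOURCE B (Python) =====
-- def check_alt_forms(search_term_chars, field_value):
--     """O(n) check: field_value must be the joined term with one ' ' or '-'
--     inserted at an element boundary (after at least one element)."""
--     full = "".join(search_term_chars)
--     m = len(full)
--     if len(field_value) != m + 1:
--         return False
--     # lo = longest common prefix of field_value and full
--     lo = 0
--     for x, y in zip(field_value, full):
--         if x != y:
--             break
--         lo += 1
--     # hi = longest common suffix of field_value and full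
--     hi = 0
--     for x, y in zip(reversed(field_value), reversed(full)):
--         if x != y:
--             break
--         hi += 1
--     # an insertion at offset k yields field_value iff m - hi <= k <= lo
--     k = 0
--     for part in search_term_chars:
--         k += len(part)
--         if m - hi <= k <= lo and field_value[k] in " -":
--             return True
--     return False
-- ===== Notes on version B (the rewrite author's own statement) =====
-- stated objective: faster
-- what changed: Replaced the try-every-split-point-and-splitter rebuild (joining prefix and suffix strings for each position) by a single-pass check: length must be m+1, compute the longest common prefix/suffix with the joined term once, then each boundary is tested in O(1).
import Mathlib
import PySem

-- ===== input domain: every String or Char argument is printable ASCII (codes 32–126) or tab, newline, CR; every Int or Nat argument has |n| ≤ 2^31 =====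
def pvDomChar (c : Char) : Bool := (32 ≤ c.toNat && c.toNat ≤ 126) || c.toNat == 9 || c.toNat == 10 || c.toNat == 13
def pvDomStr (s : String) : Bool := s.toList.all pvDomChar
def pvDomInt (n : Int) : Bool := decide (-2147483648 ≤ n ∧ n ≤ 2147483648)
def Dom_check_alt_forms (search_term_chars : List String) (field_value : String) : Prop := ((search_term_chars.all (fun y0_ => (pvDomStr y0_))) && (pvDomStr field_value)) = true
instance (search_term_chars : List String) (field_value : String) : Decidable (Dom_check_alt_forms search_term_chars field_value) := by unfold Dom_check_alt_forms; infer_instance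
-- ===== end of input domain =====

-- B replaces A's rebuild-a-candidate-per-split-point-and-splitter scan by one pass:
-- a length check, one longest-common-prefix/suffix computation, then an O(1) test
-- per element boundary (objective: faster).

-- ===== PORT A =====
def check_alt_forms (search_term_chars : List String) (field_value : String) : Bool :=
  -- match = False; for splitter in [" ", "-"]: if not match: for i, _ in enumerate(...): ...
  let splitters : List String := [" ", "-"]
  splitters.foldl (fun mtch splitter =>
    if mtch = false then
      (PySem.List.enumerate search_term_chars).foldl (fun m p =>
        let first_ele := PySem.Str.join "" (PySem.List.slice search_term_chars none (some (p.1 + 1)))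
        let second_ele := PySem.Str.join "" (PySem.List.slice search_term_chars (some (p.1 + 1)) none)
        let both := first_ele ++ splitter ++ second_ele
        if both == field_value then true else m) mtch
    else mtch) false

-- ===== PORT B =====
-- helper for B: longest common prefix length (the zip/break loops of Source B)
def pvLcp : List Char → List Char → Nat
  | x :: a, y :: b => if x = y then pvLcp a b + 1 else 0
  | _, _ => 0

-- helper for B: the final boundary loop of Source B (k is the running offset)
def pvBoundaryLoop (parts : List String) (k m lo hi : Nat) (f : List Char) : Bool :=
  match parts with
  | [] => false
  | p :: rest =>
    let k' := k + p.toList.length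
    if decide (m - hi ≤ k') && decide (k' ≤ lo) && (f[k']?.any fun c => c == ' ' || c == '-') then
      true
    else pvBoundaryLoop rest k' m lo hi f

def check_alt_forms_alt (search_term_chars : List String) (field_value : String) : Bool :=
  let full := (search_term_chars.map String.toList).flatten   -- "".join(search_term_chars), as code points
  let m := full.length
  let f := field_value.toList
  if f.length ≠ m + 1 then false
  else
    let lo := pvLcp f full
    let hi := pvLcp f.reverse full.reverse
    pvBoundaryLoop search_term_chars 0 m lo hi f

-- ===== PRECONDITION & SPEC =====
def Spec_check_alt_forms (search_term_chars : List String) (field_value : String) (out : Bool) : Prop := out = check_alt_forms_alt search_term_chars field_value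
instance (search_term_chars : List String) (field_value : String) (out : Bool) : Decidable (Spec_check_alt_forms search_term_chars field_value out) := by unfold Spec_check_alt_forms; infer_instance

-- ===== CLAIM (what is proved, stated in full; the proofs are below) =====
def Claim_equal_check_alt_forms : Prop := ∀ (search_term_chars : List String) (field_value : String), Dom_check_alt_forms search_term_chars field_value → Spec_check_alt_forms search_term_chars field_value (check_alt_forms search_term_chars field_value)

-- ===== LEMMAS AND PROOFS =====

-- cumulative code-point length of the first t elements
def pvCum (chars : List String) (t : Nat) : Nat :=
  ((((chars.map String.toList).take t)).flatten).length

-- the inner for-loop of A for one splitter, as an `any`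
def pvInner (chars : List String) (fv s : String) : Bool :=
  (PySem.List.enumerate chars).any fun p =>
    PySem.Str.join "" (PySem.List.slice chars none (some (p.1 + 1))) ++ s
      ++ PySem.Str.join "" (PySem.List.slice chars (some (p.1 + 1)) none) == fv

lemma pvJoin_nil_flatten (ls : List (List Char)) : PySem.Chars.join [] ls = ls.flatten := by
  show [].intercalate ls = ls.flatten
  induction ls with
  | nil => simp [List.intercalate]
  | cons a t ih => cases t with
    | nil => simp [List.intercalate]
    | cons b u => simp only [List.intercalate, List.intersperse] at *; simp_all

lemma pvStrJoin_toList (l : List String) :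
    (PySem.Str.join "" l).toList = (l.map String.toList).flatten := by
  rw [PySem.Str.toList_join]
  have h : ("" : String).toList = [] := rfl
  rw [h, pvJoin_nil_flatten]

lemma pvTakeFlatten {α : Type} (L : List (List α)) (t : Nat) :
    (L.take t).flatten = L.flatten.take ((L.take t).flatten).length := by
  conv_rhs => rw [show L.flatten = (L.take t).flatten ++ (L.drop t).flatten by
    rw [← List.flatten_append, List.take_append_drop]]
  rw [List.take_left]

lemma pvDropFlatten {α : Type} (L : List (List α)) (t : Nat) :
    (L.drop t).flatten = L.flatten.drop ((L.take t).flatten).length := by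
  conv_rhs => rw [show L.flatten = (L.take t).flatten ++ (L.drop t).flatten by
    rw [← List.flatten_append, List.take_append_drop]]
  rw [List.drop_left]

lemma pvCum_le (chars : List String) (t : Nat) :
    pvCum chars t ≤ ((chars.map String.toList).flatten).length := by
  rw [pvCum]
  conv_rhs => rw [show (chars.map String.toList).flatten
      = ((chars.map String.toList).take t).flatten ++ ((chars.map String.toList).drop t).flatten by
    rw [← List.flatten_append, List.take_append_drop]]
  rw [List.length_append]
  omega

lemma pvFoldl_if_any {α : Type} (p : α → Bool) (xs : List α) (b : Bool) :
    xs.foldl (fun m x => if p x then true else m) b = (b || xs.any p) := by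
  induction xs generalizing b with
  | nil => simp
  | cons x xs ih =>
    rw [List.foldl_cons, ih]
    by_cases h : p x = true <;> simp [h]

lemma pvIteOr (a b : Bool) : (if a = false then (a || b) else a) = (a || b) := by
  cases a <;> simp

-- one candidate comparison of A, stated over code points
lemma pvBuild (chars : List String) (fv s : String) (i : Nat) :
    (PySem.Str.join "" (PySem.List.slice chars none (some ((i:Int) + 1)))
      ++ s ++ PySem.Str.join "" (PySem.List.slice chars (some ((i:Int) + 1)) none) == fv) = true
    ↔ ((chars.map String.toList).flatten).take (pvCum chars (i+1)) ++ s.toList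
        ++ ((chars.map String.toList).flatten).drop (pvCum chars (i+1)) = fv.toList := by
  rw [beq_iff_eq]
  have hc : ((i:Int) + 1) = (((i+1 : Nat)) : Int) := by push_cast; ring
  rw [hc, PySem.List.slice_to_natCast, PySem.List.slice_from_natCast]
  constructor
  · intro h
    have h2 := congrArg String.toList h
    rw [String.toList_append, String.toList_append, pvStrJoin_toList, pvStrJoin_toList,
      List.map_take, List.map_drop, pvTakeFlatten, pvDropFlatten] at h2
    rw [pvCum]
    exact h2
  · intro h
    apply String.toList_injective
    rw [String.toList_append, String.toList_append, pvStrJoin_toList, pvStrJoin_toList,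
      List.map_take, List.map_drop, pvTakeFlatten, pvDropFlatten]
    rw [pvCum] at h
    exact h

lemma pvA_eq_or (chars : List String) (fv : String) :
    check_alt_forms chars fv = (pvInner chars fv " " || pvInner chars fv "-") := by
  unfold check_alt_forms pvInner
  rw [List.foldl_cons, List.foldl_cons, List.foldl_nil]
  simp only [pvFoldl_if_any, Bool.false_or, if_true]
  rw [pvIteOr]

lemma pvInner_iff (chars : List String) (fv : String) (s : String) (c : Char)
    (hs : s.toList = [c]) :
    pvInner chars fv s = true ↔
      ∃ i < chars.length,
        fv.toList = ((chars.map String.toList).flatten).take (pvCum chars (i+1))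
          ++ c :: ((chars.map String.toList).flatten).drop (pvCum chars (i+1)) := by
  unfold pvInner
  rw [List.any_eq_true]
  constructor
  · rintro ⟨p, hp, hcond⟩
    rw [PySem.List.mem_enumerate_iff] at hp
    obtain ⟨k, hk, rfl⟩ := hp
    simp only [zero_add] at hcond
    refine ⟨k, hk, ?_⟩
    have h := (pvBuild chars fv s k).mp hcond
    rw [hs] at h
    rw [← h]
    simp
  · rintro ⟨i, hi, hfv⟩
    refine ⟨((i:Int), chars[i]), ?_, ?_⟩
    · rw [PySem.List.mem_enumerate_iff]; exact ⟨i, hi, by simp⟩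
    · have h := (pvBuild chars fv s i).mpr (by rw [hs, hfv]; simp)
      simpa using h

-- A characterisation: a match at position i with splitter c means fv is the
-- joined term with c inserted at offset pvCum (i+1)
lemma pvA_iff (chars : List String) (fv : String) :
    check_alt_forms chars fv = true ↔
      ∃ i < chars.length, ∃ c ∈ [' ', '-'],
        fv.toList = ((chars.map String.toList).flatten).take (pvCum chars (i+1))
          ++ c :: ((chars.map String.toList).flatten).drop (pvCum chars (i+1)) := by
  rw [pvA_eq_or, Bool.or_eq_true,
    pvInner_iff chars fv " " ' ' (by decide), pvInner_iff chars fv "-" '-' (by decide)]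
  constructor
  · rintro (⟨i, hi, h⟩ | ⟨i, hi, h⟩)
    · exact ⟨i, hi, ' ', by simp, h⟩
    · exact ⟨i, hi, '-', by simp, h⟩
  · rintro ⟨i, hi, c, hc, h⟩
    simp only [List.mem_cons, List.not_mem_nil, or_false] at hc
    rcases hc with rfl | rfl
    · exact Or.inl ⟨i, hi, h⟩
    · exact Or.inr ⟨i, hi, h⟩

-- B's boundary loop characterisation
lemma pvBLoop_iff (parts : List String) (m lo hi : Nat) (f : List Char) :
    ∀ k, pvBoundaryLoop parts k m lo hi f = true ↔
      ∃ j < parts.length,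
        m - hi ≤ k + pvCum parts (j+1) ∧ k + pvCum parts (j+1) ≤ lo ∧
        (f[k + pvCum parts (j+1)]?.any fun c => c == ' ' || c == '-') = true := by
  induction parts with
  | nil => intro k; simp [pvBoundaryLoop]
  | cons p rest ih =>
    intro k
    have cumsucc : ∀ j : Nat, pvCum (p :: rest) (j+1) = p.toList.length + pvCum rest j := by
      intro j; simp [pvCum]
    have cum0 : pvCum rest 0 = 0 := by simp [pvCum]
    rw [pvBoundaryLoop]
    by_cases hcond : (decide (m - hi ≤ k + p.toList.length) && decide (k + p.toList.length ≤ lo)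
        && (f[k + p.toList.length]?.any fun c => c == ' ' || c == '-')) = true
    · rw [if_pos hcond]
      simp only [Bool.and_eq_true, decide_eq_true_eq] at hcond
      constructor
      · intro _
        have e : k + pvCum (p :: rest) (0+1) = k + p.toList.length := by
          rw [cumsucc 0, cum0]; omega
        exact ⟨0, by simp, by rw [e]; exact hcond.1.1, by rw [e]; exact hcond.1.2,
          by rw [e]; exact hcond.2⟩
      · intro _; rfl
    · rw [if_neg hcond, ih (k + p.toList.length)]
      constructor
      · rintro ⟨j, hj, h1, h2, h3⟩
        have e : k + pvCum (p :: rest) (j+1+1) = k + p.toList.length + pvCum rest (j+1) := by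
          rw [cumsucc (j+1)]; ring
        exact ⟨j+1, by simpa using Nat.succ_lt_succ hj, by rw [e]; exact h1,
          by rw [e]; exact h2, by rw [e]; exact h3⟩
      · rintro ⟨j, hj, h1, h2, h3⟩
        cases j with
        | zero =>
          exfalso
          apply hcond
          have e : k + pvCum (p :: rest) (0+1) = k + p.toList.length := by
            rw [cumsucc 0, cum0]; omega
          rw [e] at h1 h2 h3
          simp only [Bool.and_eq_true, decide_eq_true_eq]
          exact ⟨⟨h1, h2⟩, h3⟩
        | succ j =>
          have e : k + pvCum (p :: rest) (j+1+1) = k + p.toList.length + pvCum rest (j+1) := by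
            rw [cumsucc (j+1)]; ring
          rw [e] at h1 h2 h3
          exact ⟨j, by simp only [List.length_cons] at hj; omega, h1, h2, h3⟩

-- lcp characterises equality of takes
lemma pvLcp_iff_take (a b : List Char) (k : Nat) (ha : k ≤ a.length) (hb : k ≤ b.length) :
    a.take k = b.take k ↔ k ≤ pvLcp a b := by
  induction a generalizing b k with
  | nil =>
    have : k = 0 := by simpa using ha
    subst this; simp
  | cons x a ih =>
    cases b with
    | nil =>
      have : k = 0 := by simpa using hb
      subst this; simp
    | cons y b =>
      cases k with
      | zero => simp
      | succ k =>
        by_cases hxy : x = y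
        · subst hxy
          have hlcp : pvLcp (x :: a) (x :: b) = pvLcp a b + 1 := by simp [pvLcp]
          rw [hlcp]
          simp only [List.take_succ_cons, List.cons.injEq, true_and]
          rw [ih b k (by simpa using ha) (by simpa using hb)]
          omega
        · have hlcp : pvLcp (x :: a) (y :: b) = 0 := by simp [pvLcp, hxy]
          rw [hlcp]
          simp only [List.take_succ_cons, List.cons.injEq]
          constructor
          · rintro ⟨h, -⟩; exact absurd h hxy
          · omega

-- the bridge: "fv is full with c inserted at offset k" in terms of lcp/lcs
lemma pvBridge (f M : List Char) (k : Nat) (hk : k ≤ M.length) (c : Char) :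
    f = M.take k ++ c :: M.drop k ↔
      (f.length = M.length + 1 ∧ M.length - pvLcp f.reverse M.reverse ≤ k ∧
        k ≤ pvLcp f M ∧ f[k]? = some c) := by
  have hlen_take : (M.take k).length = k := by simp [hk]
  have hdroprev : ∀ (_ : f.length = M.length + 1),
      (f.drop (k+1) = M.drop k ↔ M.length - k ≤ pvLcp f.reverse M.reverse) := by
    intro hf
    have h1 : (f.drop (k+1)).reverse = f.reverse.take (M.length - k) := by
      rw [List.reverse_drop]
      congr 1
      rw [hf]
      omega
    have h2 : (M.drop k).reverse = M.reverse.take (M.length - k) := by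
      rw [List.reverse_drop]
    constructor
    · intro h
      have h' : f.reverse.take (M.length - k) = M.reverse.take (M.length - k) := by
        rw [← h1, ← h2, h]
      exact (pvLcp_iff_take _ _ _ (by simp [hf]; omega) (by simp)).mp h'
    · intro h
      have h' := (pvLcp_iff_take f.reverse M.reverse (M.length - k)
        (by simp [hf]; omega) (by simp)).mpr h
      have := congrArg List.reverse (h1.trans (h'.trans h2.symm))
      simpa using this
  constructor
  · intro h
    have hf : f.length = M.length + 1 := by
      rw [h]; simp
    have htake : f.take k = M.take k := by
      rw [h, List.take_append_of_le_length (by omega)]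
      simp [hk]
    have hdrop : f.drop (k+1) = M.drop k := by
      rw [h]
      have e : k + 1 = (M.take k).length + 1 := by rw [hlen_take]
      rw [e, List.drop_append]
      simp
    have hget : f[k]? = some c := by
      rw [h]
      rw [List.getElem?_append_right (by omega)]
      simp [hlen_take]
    refine ⟨hf, ?_, (pvLcp_iff_take f M k (by omega) hk).mp htake, hget⟩
    have := (hdroprev hf).mp hdrop
    omega
  · rintro ⟨hf, hhi, hlo, hget⟩
    have htake : f.take k = M.take k := (pvLcp_iff_take f M k (by omega) hk).mpr hlo
    have hdrop : f.drop (k+1) = M.drop k := (hdroprev hf).mpr (by omega)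
    have hklt : k < f.length := by omega
    have hdecomp : f = f.take k ++ f[k] :: f.drop (k+1) := by
      conv_lhs => rw [← List.take_append_drop k f]
      congr 1
      exact (List.getElem_cons_drop hklt).symm
    rw [hdecomp, htake, hdrop]
    have hc : f[k] = c := by
      have e := List.getElem?_eq_getElem hklt
      rw [e] at hget
      exact Option.some.inj hget
    rw [hc]

-- ===== VERDICT (by name: the statement is the Claim_ definition above) =====
theorem check_alt_forms_spec : Claim_equal_check_alt_forms := by
  intro chars fv _
  unfold Spec_check_alt_forms
  set M := (chars.map String.toList).flatten with hM
  set f := fv.toList with hf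
  set m := M.length with hm
  by_cases hlen : f.length = m + 1
  · have hB : check_alt_forms_alt chars fv
        = pvBoundaryLoop chars 0 m (pvLcp f M) (pvLcp f.reverse M.reverse) f := by
      simp only [check_alt_forms_alt]
      rw [← hM, ← hf, ← hm, if_neg (by omega)]
    rw [hB]
    rcases Bool.eq_false_or_eq_true (check_alt_forms chars fv) with hA | hA
    · rw [hA]
      obtain ⟨i, hi, c, hc, hfv⟩ := (pvA_iff chars fv).mp hA
      rw [← hf, ← hM] at hfv
      have hb := (pvBridge f M (pvCum chars (i+1)) (pvCum_le chars (i+1)) c).mp hfv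
      symm
      rw [pvBLoop_iff chars m (pvLcp f M) (pvLcp f.reverse M.reverse) f 0]
      refine ⟨i, hi, by simpa using hb.2.1, by simpa using hb.2.2.1, ?_⟩
      simp only [zero_add]
      rw [Option.any_eq_true]
      refine ⟨c, hb.2.2.2, ?_⟩
      simp only [List.mem_cons, List.not_mem_nil, or_false] at hc
      rcases hc with rfl | rfl <;> simp
    · rw [hA]
      rcases Bool.eq_false_or_eq_true
          (pvBoundaryLoop chars 0 m (pvLcp f M) (pvLcp f.reverse M.reverse) f) with hB2 | hB2
      · exfalso
        rw [pvBLoop_iff chars m (pvLcp f M) (pvLcp f.reverse M.reverse) f 0] at hB2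
        obtain ⟨j, hj, h1, h2, h3⟩ := hB2
        simp only [zero_add] at h1 h2 h3
        rw [Option.any_eq_true] at h3
        obtain ⟨c, hc, hcval⟩ := h3
        have hcmem : c ∈ [' ', '-'] := by
          simp only [Bool.or_eq_true, beq_iff_eq] at hcval
          rcases hcval with rfl | rfl <;> simp
        have hbr := (pvBridge f M (pvCum chars (j+1)) (pvCum_le chars (j+1)) c).mpr
          ⟨hlen, h1, h2, hc⟩
        have hA' := (pvA_iff chars fv).mpr ⟨j, hj, c, hcmem, by rw [← hf, ← hM]; exact hbr⟩
        rw [hA] at hA'; exact Bool.false_ne_true hA'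
      · rw [hB2]
  · have hB : check_alt_forms_alt chars fv = false := by
      simp only [check_alt_forms_alt]
      rw [← hM, ← hf, ← hm, if_pos (by omega)]
    rw [hB]
    rcases Bool.eq_false_or_eq_true (check_alt_forms chars fv) with hA | hA
    · exfalso
      obtain ⟨i, hi, c, hc, hfv⟩ := (pvA_iff chars fv).mp hA
      rw [← hf, ← hM] at hfv
      have hb := (pvBridge f M (pvCum chars (i+1)) (pvCum_le chars (i+1)) c).mp hfv
      exact hlen hb.1
    · exact hA
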